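-- pv_equiv track=rewrite | github.com/BastienSegura/cyclop-eddy | knowledge-map-gen/render_map.py | compute_levels
-- ===== SOURCE A (Python) =====
-- from collections import defaultdict, deque
--
-- def compute_levels(root: str, concepts: dict[str, list[str]], nodes: set[str]) -> dict[str, int]:
--     levels = {root: 0}
--     queue = deque([root])
--
--     while queue:
--         node = queue.popleft()
--         for child in concepts.get(node, []):
--             if child in levels:
--                 continue
--             levels[child] = levels[node] + 1
--             queue.append(child)
--
--     fallback_level = max(levels.values(), default=0) + 1
--     for node in sorted(nodes):
--         levels.setdefault(node, fallback_level)
--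
--     return levels
-- ===== SOURCE B (Python) =====
-- def compute_levels(root: str, concepts: dict[str, list[str]], nodes: set[str]) -> dict[str, int]:
--     # Kleene-style closure iteration: each round re-expands the ENTIRE reached set by one
--     # step; the fresh nodes of round k are exactly BFS layer k.  No queue, no threaded
--     # visited set, no level lookups during the traversal; dedup is declarative
--     # (dict.fromkeys) and the level of a node is assigned afterwards from its layer index.
--     layers = [[root]]
--     while True:
--         reached = [n for layer in layers for n in layer]
--         children = [c for n in reached for c in concepts.get(n, [])]
--         new = [c for c in dict.fromkeys(children) if c not in set(reached)]
--         if not new: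
--             break
--         layers.append(new)
--     levels = {n: k for k, layer in enumerate(layers) for n in layer}
--     fallback = len(layers)
--     for node in sorted(nodes):
--         levels.setdefault(node, fallback)
--     return levels
-- ===== Notes on version B (the rewrite author's own statement) =====
-- stated objective: alternative
-- what changed: A's queue-based BFS (deque, per-node distance lookup levels[node]+1, incremental visited dict) is replaced by Kleene closure iteration: each round recomputes the one-step expansion of the whole reached set (dedup via dict.fromkeys, set difference against reached); the per-round delta is BFS layer k, levels are assigned afterwards from layer indices and the fallback is len(layers); only the final sorted setdefault pass is shared.
import Mathlib
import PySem

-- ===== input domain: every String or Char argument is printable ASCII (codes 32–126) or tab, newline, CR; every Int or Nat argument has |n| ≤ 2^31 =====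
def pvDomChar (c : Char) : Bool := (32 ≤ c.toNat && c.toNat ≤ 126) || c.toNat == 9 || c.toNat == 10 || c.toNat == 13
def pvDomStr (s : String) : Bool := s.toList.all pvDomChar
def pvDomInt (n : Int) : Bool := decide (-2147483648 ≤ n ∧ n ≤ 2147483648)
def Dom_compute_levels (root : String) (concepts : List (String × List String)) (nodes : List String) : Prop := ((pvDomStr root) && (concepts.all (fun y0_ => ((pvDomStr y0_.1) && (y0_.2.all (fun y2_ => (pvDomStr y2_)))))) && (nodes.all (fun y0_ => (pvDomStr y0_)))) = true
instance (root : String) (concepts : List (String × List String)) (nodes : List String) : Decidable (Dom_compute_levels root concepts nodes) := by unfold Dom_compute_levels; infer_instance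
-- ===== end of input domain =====

-- B replaces A's queue BFS by Kleene closure iteration (re-expand the whole reached set each
-- round; the per-round delta is BFS layer k, levels assigned afterwards from layer indices):
-- an alternative decomposition of the same task, same result, not claimed faster.

-- `concepts.get(node, [])` (shared by both sources): first match in the association list.
def pvChildren (concepts : List (String × List String)) (node : String) : List String :=
  (((concepts.find? (fun p => p.1 == node)).map (fun p => p.2)).getD [])

-- ===== PORT A =====
-- body of A's inner `for child in concepts.get(node, [])` loop; state = (levels, queue)
def pvBodyA (st : PySem.Dict String Int × List String) (node child : String) :
    PySem.Dict String Int × List String :=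
  if st.1.contains child then st
  -- `levels[node]` is exact as getD: node is always a key of levels when dequeued
  else (st.1.insert child (st.1.getD node 0 + 1), st.2 ++ [child])

-- A's `while queue:` loop; fuel is only a totality guard (1 + total children count always suffices)
def pvBfsA (concepts : List (String × List String)) :
    Nat → PySem.Dict String Int → List String → PySem.Dict String Int
  | 0, lv, _ => lv
  | _ + 1, lv, [] => lv
  | fuel + 1, lv, node :: rest =>
      let st := (pvChildren concepts node).foldl (fun st child => pvBodyA st node child) (lv, rest)
      pvBfsA concepts fuel st.1 st.2

def compute_levels (root : String) (concepts : List (String × List String)) (nodes : List String) : List (String × Int) :=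
  let fuel := 1 + (concepts.map (fun p => p.2.length)).sum
  let levels := pvBfsA concepts fuel ((PySem.Dict.empty).insert root 0) [root]
  let fallback := PySem.List.maxD levels.values (fun v => v) 0 + 1
  ((PySem.List.sorted nodes (fun s => s) false).foldl (fun d n => d.setdefault n fallback) levels).items

-- ===== PORT B =====
-- `{n: k for k, layer in enumerate(layers) for n in layer}`
def pvLevelsOf (layers : List (List String)) : PySem.Dict String Int :=
  (layers.zipIdx).foldl
    (fun d p => p.1.foldl (fun d n => d.insert n ((p.2 : Nat) : Int)) d) PySem.Dict.empty

-- B's `while True:` closure loop; fuel is only a totality guard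
def pvClosure (concepts : List (String × List String)) :
    Nat → List (List String) → List (List String)
  | 0, layers => layers
  | fuel + 1, layers =>
      let reached := layers.flatten
      let children := reached.flatMap (pvChildren concepts)
      let newNodes := (PySem.List.dedup children).filter
        (fun c => !(PySem.Set.contains (PySem.Set.ofList reached) c))
      if newNodes.isEmpty then layers else pvClosure concepts fuel (layers ++ [newNodes])

def compute_levels_alt (root : String) (concepts : List (String × List String)) (nodes : List String) : List (String × Int) :=
  let fuel := 1 + (concepts.map (fun p => p.2.length)).sum
  let layers := pvClosure concepts fuel [[root]]
  let levels := pvLevelsOf layers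
  let fallback : Int := (layers.length : Int)
  ((PySem.List.sorted nodes (fun s => s) false).foldl (fun d n => d.setdefault n fallback) levels).items

-- ===== PRECONDITION & SPEC =====
def Spec_compute_levels (root : String) (concepts : List (String × List String)) (nodes : List String) (out : List (String × Int)) : Prop := out = compute_levels_alt root concepts nodes
instance (root : String) (concepts : List (String × List String)) (nodes : List String) (out : List (String × Int)) : Decidable (Spec_compute_levels root concepts nodes out) := by unfold Spec_compute_levels; infer_instance

-- ===== CLAIM (what is proved, stated in full; the proofs are below) =====
def Claim_equal_compute_levels : Prop := ∀ (root : String) (concepts : List (String × List String)) (nodes : List String), Dom_compute_levels root concepts nodes → Spec_compute_levels root concepts nodes (compute_levels root concepts nodes)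

-- ===== LEMMAS AND PROOFS =====

-- ---- Stage 1: A's queue BFS equals a round-synchronous frontier recursion (pvBfsB) ----

-- body of a frontier child step; state = (levels, next frontier)
def pvBodyB (lvl : Int) (st : PySem.Dict String Int × List String) (child : String) :
    PySem.Dict String Int × List String :=
  if st.1.contains child then st
  else (st.1.insert child (lvl + 1), st.2 ++ [child])

-- one node of the current frontier (fuel threaded per node, mirroring pvBfsA's consumption)
def pvRNode (concepts : List (String × List String)) (lvl : Int)
    (st : Nat × PySem.Dict String Int × List String) (node : String) :
    Nat × PySem.Dict String Int × List String :=
  match st with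
  | (0, lv, nxt) => (0, lv, nxt)
  | (f + 1, lv, nxt) =>
      let r := (pvChildren concepts node).foldl (pvBodyB lvl) (lv, nxt)
      (f, r.1, r.2)

def pvRoundB (concepts : List (String × List String)) (lvl : Int) (curr : List String)
    (st : Nat × PySem.Dict String Int × List String) :
    Nat × PySem.Dict String Int × List String :=
  curr.foldl (pvRNode concepts lvl) st

theorem pvRNode_fuel_le (concepts : List (String × List String)) (lvl : Int)
    (st : Nat × PySem.Dict String Int × List String) (node : String) :
    (pvRNode concepts lvl st node).1 ≤ st.1 := by
  obtain ⟨f, lv, nxt⟩ := st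
  cases f <;> simp [pvRNode]

theorem pvRoundB_fuel_le (concepts : List (String × List String)) (lvl : Int) :
    ∀ (curr : List String) (st : Nat × PySem.Dict String Int × List String),
    (pvRoundB concepts lvl curr st).1 ≤ st.1 := by
  intro curr
  induction curr with
  | nil => intro st; simp [pvRoundB]
  | cons node rest ih =>
      intro st
      calc (pvRoundB concepts lvl (node :: rest) st).1
          = (pvRoundB concepts lvl rest (pvRNode concepts lvl st node)).1 := rfl
        _ ≤ (pvRNode concepts lvl st node).1 := ih _
        _ ≤ st.1 := pvRNode_fuel_le concepts lvl st node

theorem pvRoundB_fuel_lt (concepts : List (String × List String)) (lvl : Int)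
    (node : String) (rest : List String) (f : Nat) (lv : PySem.Dict String Int)
    (nxt : List String) :
    (pvRoundB concepts lvl (node :: rest) (f + 1, lv, nxt)).1 < f + 1 := by
  have h : pvRoundB concepts lvl (node :: rest) (f + 1, lv, nxt)
      = pvRoundB concepts lvl rest (pvRNode concepts lvl (f + 1, lv, nxt) node) := rfl
  have h2 : (pvRNode concepts lvl (f + 1, lv, nxt) node).1 = f := rfl
  have hle := pvRoundB_fuel_le concepts lvl rest (pvRNode concepts lvl (f + 1, lv, nxt) node)
  rw [h]
  omega

-- the round-synchronous frontier recursion, with the round counter `lvl`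
def pvBfsB (concepts : List (String × List String)) (fuel : Nat)
    (lv : PySem.Dict String Int) (curr : List String) (lvl : Int) : PySem.Dict String Int :=
  match fuel, curr with
  | 0, _ => lv
  | _ + 1, [] => lv
  | f + 1, node :: rest =>
      let r := pvRoundB concepts lvl (node :: rest) (f + 1, lv, [])
      pvBfsB concepts r.1 r.2.1 r.2.2 (lvl + 1)
termination_by fuel
decreasing_by
  exact pvRoundB_fuel_lt concepts lvl node rest f lv []

theorem pvBfsB_nil (concepts : List (String × List String)) (f : Nat)
    (lv : PySem.Dict String Int) (lvl : Int) : pvBfsB concepts f lv [] lvl = lv := by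
  cases f with
  | zero => rw [pvBfsB]
  | succ m => rw [pvBfsB]

-- A's child loop equals the frontier child loop once the dequeued node's stored level is lvl.
theorem pv_childfold_eq (lvl : Int) (node : String) :
    ∀ (cs : List String) (lv : PySem.Dict String Int) (a : List String),
    lv.get? node = some lvl →
    cs.foldl (fun st child => pvBodyA st node child) (lv, a)
      = cs.foldl (pvBodyB lvl) (lv, a) := by
  intro cs
  induction cs with
  | nil => intro lv a h; rfl
  | cons c cs ih =>
      intro lv a h
      simp only [List.foldl_cons]
      by_cases hc : lv.contains c = true
      · have hA : pvBodyA (lv, a) node c = (lv, a) := by simp [pvBodyA, hc]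
        have hB : pvBodyB lvl (lv, a) c = (lv, a) := by simp [pvBodyB, hc]
        rw [hA, hB]
        exact ih lv a h
      · have hnc : node ≠ c := by
          intro e
          have hcn : lv.contains node = true := by
            rw [PySem.Dict.contains_eq_isSome_get?, h]; rfl
          rw [e] at hcn
          exact hc hcn
        have hA : pvBodyA (lv, a) node c = (lv.insert c (lvl + 1), a ++ [c]) := by
          simp [pvBodyA, hc, PySem.Dict.getD_of_get?_eq_some, h]
        have hB : pvBodyB lvl (lv, a) c = (lv.insert c (lvl + 1), a ++ [c]) := by
          simp [pvBodyB, hc]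
        rw [hA, hB]
        exact ih _ _ (by simp [PySem.Dict.get?_insert, hnc, h])

-- fresh-key inserts of the child loop never disturb an existing binding
theorem pv_childfold_mono (lvl : Int) :
    ∀ (cs : List String) (lv : PySem.Dict String Int) (a : List String) (k : String) (v : Int),
    lv.get? k = some v →
    (cs.foldl (pvBodyB lvl) (lv, a)).1.get? k = some v := by
  intro cs
  induction cs with
  | nil => intro lv a k v h; exact h
  | cons c cs ih =>
      intro lv a k v h
      simp only [List.foldl_cons]
      by_cases hc : lv.contains c = true
      · have hB : pvBodyB lvl (lv, a) c = (lv, a) := by simp [pvBodyB, hc]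
        rw [hB]; exact ih lv a k v h
      · have hkc : k ≠ c := by
          intro e
          have hck : lv.contains k = true := by
            rw [PySem.Dict.contains_eq_isSome_get?, h]; rfl
          rw [e] at hck
          exact hc hck
        have hB : pvBodyB lvl (lv, a) c = (lv.insert c (lvl + 1), a ++ [c]) := by
          simp [pvBodyB, hc]
        rw [hB]
        exact ih _ _ _ _ (by simp [PySem.Dict.get?_insert, hkc, h])

-- the accumulator only ever grows at the back; the levels part ignores it
theorem pv_childfold_acc (lvl : Int) :
    ∀ (cs : List String) (lv : PySem.Dict String Int) (a : List String),
    cs.foldl (pvBodyB lvl) (lv, a)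
      = ((cs.foldl (pvBodyB lvl) (lv, [])).1, a ++ (cs.foldl (pvBodyB lvl) (lv, [])).2) := by
  intro cs
  induction cs with
  | nil => intro lv a; simp
  | cons c cs ih =>
      intro lv a
      simp only [List.foldl_cons]
      by_cases hc : lv.contains c = true
      · have hB : ∀ x : List String, pvBodyB lvl (lv, x) c = (lv, x) := by
          intro x; simp [pvBodyB, hc]
        rw [hB, hB]
        exact ih lv a
      · have hB : ∀ x : List String, pvBodyB lvl (lv, x) c = (lv.insert c (lvl + 1), x ++ [c]) := by
          intro x; simp [pvBodyB, hc]
        rw [hB, hB]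
        rw [ih (lv.insert c (lvl + 1)) (a ++ [c]), ih (lv.insert c (lvl + 1)) ([] ++ [c])]
        simp

-- every element the child loop appends is bound to lvl + 1 in the resulting dict
theorem pv_childfold_new (lvl : Int) :
    ∀ (cs : List String) (lv : PySem.Dict String Int) (a : List String) (c : String),
    c ∈ (cs.foldl (pvBodyB lvl) (lv, a)).2 →
    c ∈ a ∨ (cs.foldl (pvBodyB lvl) (lv, a)).1.get? c = some (lvl + 1) := by
  intro cs
  induction cs with
  | nil => intro lv a c h; exact Or.inl h
  | cons c' cs ih =>
      intro lv a c h
      simp only [List.foldl_cons] at h ⊢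
      by_cases hc : lv.contains c' = true
      · have hB : pvBodyB lvl (lv, a) c' = (lv, a) := by simp [pvBodyB, hc]
        rw [hB] at h ⊢
        exact ih lv a c h
      · have hB : pvBodyB lvl (lv, a) c' = (lv.insert c' (lvl + 1), a ++ [c']) := by
          simp [pvBodyB, hc]
        rw [hB] at h ⊢
        rcases ih _ _ _ h with hm | hg
        · rcases List.mem_append.mp hm with hm | hm
          · exact Or.inl hm
          · have hcc' : c = c' := by simpa using hm
            subst hcc'
            exact Or.inr (pv_childfold_mono lvl cs _ _ c (lvl + 1)
              (PySem.Dict.get?_insert_self _ _ _))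
        · exact Or.inr hg

theorem pvRoundB_zero (concepts : List (String × List String)) (lvl : Int) :
    ∀ (curr : List String) (lv : PySem.Dict String Int) (nxt : List String),
    pvRoundB concepts lvl curr (0, lv, nxt) = (0, lv, nxt) := by
  intro curr
  induction curr with
  | nil => intro lv nxt; rfl
  | cons node rest ih => intro lv nxt; exact ih lv nxt

-- one whole round: interleaved queue processing of `curr ++ nxt` equals expanding the frontier
theorem pv_round_eq (concepts : List (String × List String)) (lvl : Int) :
    ∀ (curr : List String) (fuel : Nat) (lv : PySem.Dict String Int) (nxt : List String),
    (∀ n ∈ curr, lv.get? n = some lvl) →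
    (∀ n ∈ nxt, lv.get? n = some (lvl + 1)) →
    pvBfsA concepts fuel lv (curr ++ nxt)
        = pvBfsA concepts (pvRoundB concepts lvl curr (fuel, lv, nxt)).1
            (pvRoundB concepts lvl curr (fuel, lv, nxt)).2.1
            (pvRoundB concepts lvl curr (fuel, lv, nxt)).2.2
      ∧ (∀ n ∈ (pvRoundB concepts lvl curr (fuel, lv, nxt)).2.2,
          (pvRoundB concepts lvl curr (fuel, lv, nxt)).2.1.get? n = some (lvl + 1)) := by
  intro curr
  induction curr with
  | nil => intro fuel lv nxt _ hnxt; exact ⟨rfl, hnxt⟩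
  | cons node rest ih =>
      intro fuel lv nxt hcurr hnxt
      cases fuel with
      | zero =>
          rw [pvRoundB_zero]
          exact ⟨rfl, hnxt⟩
      | succ f =>
          have hnode : lv.get? node = some lvl := hcurr node (List.mem_cons_self ..)
          have hacc1 := pv_childfold_acc lvl (pvChildren concepts node) lv (rest ++ nxt)
          have hacc2 := pv_childfold_acc lvl (pvChildren concepts node) lv nxt
          have hstep : pvRoundB concepts lvl (node :: rest) (f + 1, lv, nxt)
              = pvRoundB concepts lvl rest
                  (f, ((pvChildren concepts node).foldl (pvBodyB lvl) (lv, nxt)).1,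
                      ((pvChildren concepts node).foldl (pvBodyB lvl) (lv, nxt)).2) := rfl
          have hA : pvBfsA concepts (f + 1) lv ((node :: rest) ++ nxt)
              = pvBfsA concepts f
                  ((pvChildren concepts node).foldl (pvBodyB lvl) (lv, rest ++ nxt)).1
                  ((pvChildren concepts node).foldl (pvBodyB lvl) (lv, rest ++ nxt)).2 := by
            show pvBfsA concepts f
                ((pvChildren concepts node).foldl (fun st child => pvBodyA st node child)
                  (lv, rest ++ nxt)).1
                ((pvChildren concepts node).foldl (fun st child => pvBodyA st node child)
                  (lv, rest ++ nxt)).2 = _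
            rw [pv_childfold_eq lvl node (pvChildren concepts node) lv (rest ++ nxt) hnode]
          have hrest : ∀ n ∈ rest,
              ((pvChildren concepts node).foldl (pvBodyB lvl) (lv, ([] : List String))).1.get? n
                = some lvl := by
            intro n hn
            exact pv_childfold_mono lvl _ lv [] n lvl (hcurr n (List.mem_cons_of_mem _ hn))
          have hnew : ∀ n ∈ nxt ++ ((pvChildren concepts node).foldl (pvBodyB lvl) (lv, ([] : List String))).2,
              ((pvChildren concepts node).foldl (pvBodyB lvl) (lv, ([] : List String))).1.get? n
                = some (lvl + 1) := by
            intro n hn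
            rcases List.mem_append.mp hn with hn | hn
            · exact pv_childfold_mono lvl _ lv [] n (lvl + 1) (hnxt n hn)
            · rcases pv_childfold_new lvl _ lv [] n hn with h0 | hg
              · simp at h0
              · exact hg
          obtain ⟨ihEq, ihInv⟩ := ih f
            ((pvChildren concepts node).foldl (pvBodyB lvl) (lv, ([] : List String))).1
            (nxt ++ ((pvChildren concepts node).foldl (pvBodyB lvl) (lv, ([] : List String))).2)
            hrest hnew
          constructor
          · calc pvBfsA concepts (f + 1) lv ((node :: rest) ++ nxt)
                = pvBfsA concepts f
                    ((pvChildren concepts node).foldl (pvBodyB lvl) (lv, rest ++ nxt)).1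
                    ((pvChildren concepts node).foldl (pvBodyB lvl) (lv, rest ++ nxt)).2 := hA
              _ = pvBfsA concepts f
                    ((pvChildren concepts node).foldl (pvBodyB lvl) (lv, ([] : List String))).1
                    (rest ++ (nxt ++ ((pvChildren concepts node).foldl (pvBodyB lvl) (lv, ([] : List String))).2)) := by
                    rw [hacc1]; simp
              _ = _ := by
                    rw [ihEq, hstep, hacc2]
          · intro n hn
            rw [hstep, hacc2] at hn ⊢
            exact ihInv n hn

theorem pv_main (concepts : List (String × List String)) :
    ∀ (fuel : Nat) (lv : PySem.Dict String Int) (curr : List String) (lvl : Int),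
    (∀ n ∈ curr, lv.get? n = some lvl) →
    pvBfsA concepts fuel lv curr = pvBfsB concepts fuel lv curr lvl := by
  intro fuel
  induction fuel using Nat.strong_induction_on with
  | _ fuel ih =>
      intro lv curr lvl hinv
      cases fuel with
      | zero => rw [pvBfsB]; rfl
      | succ f =>
          cases curr with
          | nil => rw [pvBfsB]; rfl
          | cons node rest =>
              obtain ⟨hEq, hInv⟩ := pv_round_eq concepts lvl (node :: rest) (f + 1) lv []
                hinv (by simp)
              have hlt := pvRoundB_fuel_lt concepts lvl node rest f lv []
              calc pvBfsA concepts (f + 1) lv (node :: rest)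
                  = pvBfsA concepts (f + 1) lv ((node :: rest) ++ []) := by simp
                _ = pvBfsA concepts (pvRoundB concepts lvl (node :: rest) (f + 1, lv, [])).1
                      (pvRoundB concepts lvl (node :: rest) (f + 1, lv, [])).2.1
                      (pvRoundB concepts lvl (node :: rest) (f + 1, lv, [])).2.2 := hEq
                _ = pvBfsB concepts (pvRoundB concepts lvl (node :: rest) (f + 1, lv, [])).1
                      (pvRoundB concepts lvl (node :: rest) (f + 1, lv, [])).2.1
                      (pvRoundB concepts lvl (node :: rest) (f + 1, lv, [])).2.2 (lvl + 1) :=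
                    ih _ hlt _ _ _ hInv
                _ = pvBfsB concepts (f + 1) lv (node :: rest) lvl := by
                    conv_rhs => rw [pvBfsB]

-- ---- Stage 2: the frontier recursion equals B's closure iteration ----

-- first-occurrence dedup against a seen-predicate (the common shape of one discovery round)
def pvNewGo (seen : String → Bool) : List String → List String
  | [] => []
  | c :: cs => if seen c then pvNewGo seen cs else c :: pvNewGo (fun x => seen x || x == c) cs

theorem pvSetContains_ofList (xs : List String) (c : String) :
    PySem.Set.contains (PySem.Set.ofList xs) c = xs.contains c := by
  simp [PySem.Set.contains, pysem]

-- B's `[c for c in dict.fromkeys(children) if c not in set(reached)]` is pvNewGo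
theorem pv_dedup_filter_eq (reached : List String) :
    ∀ (cs s : List String),
    (cs.foldl PySem.Set.add s).filter (fun c => !(reached.contains c))
      = s.filter (fun c => !(reached.contains c))
        ++ pvNewGo (fun x => reached.contains x || s.contains x) cs := by
  intro cs
  induction cs with
  | nil => intro s; simp [pvNewGo]
  | cons c cs ih =>
      intro s
      simp only [List.foldl_cons]
      by_cases hs : c ∈ s
      · have hadd : PySem.Set.add s c = s := by simp [PySem.Set.add, hs]
        have hseen : (reached.contains c || s.contains c) = true := by simp [hs]
        rw [hadd, pvNewGo, if_pos hseen, ih s]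
      · have hadd : PySem.Set.add s c = s ++ [c] := by simp [PySem.Set.add, hs]
        rw [hadd, ih (s ++ [c])]
        by_cases hr : c ∈ reached
        · have hseen : (reached.contains c || s.contains c) = true := by simp [hr]
          rw [pvNewGo, if_pos hseen]
          have hfun : (fun x => reached.contains x || (s ++ [c]).contains x)
              = (fun x => reached.contains x || s.contains x) := by
            funext x
            by_cases hx : x = c
            · subst hx; simp [hr]
            · simp [hx]
          rw [hfun]
          simp [List.filter_append, hr]
        · have hseen : (reached.contains c || s.contains c) = false := by
            simp [hr, hs]
          rw [pvNewGo, hseen]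
          simp only [Bool.false_eq_true, if_false]
          have hfun : (fun x => reached.contains x || (s ++ [c]).contains x)
              = (fun x => (reached.contains x || s.contains x) || x == c) := by
            funext x
            by_cases hx : x = c
            · subst hx; simp
            · simp [hx, beq_iff_eq]
          rw [hfun]
          simp [List.filter_append, hr]

theorem pv_new_eq (reached cs : List String) :
    (PySem.List.dedup cs).filter (fun c => !(PySem.Set.contains (PySem.Set.ofList reached) c))
      = pvNewGo (fun x => reached.contains x) cs := by
  simp only [pvSetContains_ofList]
  rw [PySem.List.dedup_eq_ofList, PySem.Set.ofList_eq_foldl,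
    pv_dedup_filter_eq reached cs []]
  have hfun : (fun x => reached.contains x || List.contains [] x)
      = (fun x => reached.contains x) := by funext x; simp
  rw [hfun]
  simp

-- the frontier child loop is pvNewGo plus the corresponding inserts
theorem pv_bodyfold_newGo (lvl : Int) :
    ∀ (cs : List String) (lv : PySem.Dict String Int) (a : List String) (seen : String → Bool),
    (∀ x, lv.contains x = seen x) →
    cs.foldl (pvBodyB lvl) (lv, a)
      = ((pvNewGo seen cs).foldl (fun d c => d.insert c (lvl + 1)) lv,
         a ++ pvNewGo seen cs) := by
  intro cs
  induction cs with
  | nil => intro lv a seen h; simp [pvNewGo]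
  | cons c cs ih =>
      intro lv a seen h
      simp only [List.foldl_cons]
      by_cases hc : lv.contains c = true
      · have hseen : seen c = true := by rw [← h]; exact hc
        have hB : pvBodyB lvl (lv, a) c = (lv, a) := by simp [pvBodyB, hc]
        rw [hB, pvNewGo, if_pos hseen]
        exact ih lv a seen h
      · have hseen : seen c = false := by rw [← h]; simpa using hc
        have hB : pvBodyB lvl (lv, a) c = (lv.insert c (lvl + 1), a ++ [c]) := by
          simp [pvBodyB, hc]
        rw [hB, pvNewGo, hseen]
        simp only [Bool.false_eq_true, if_false]
        rw [ih (lv.insert c (lvl + 1)) (a ++ [c]) (fun x => seen x || x == c)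
          (by intro x; rw [PySem.Dict.contains_insert, h x, Bool.or_comm])]
        simp [List.foldl_cons]

-- a round at sufficient fuel is one child pass over the concatenated children
theorem pvRoundB_flat (concepts : List (String × List String)) (lvl : Int) :
    ∀ (curr : List String) (f : Nat) (lv : PySem.Dict String Int) (nxt : List String),
    curr.length ≤ f →
    pvRoundB concepts lvl curr (f, lv, nxt)
      = (f - curr.length, (curr.flatMap (pvChildren concepts)).foldl (pvBodyB lvl) (lv, nxt)) := by
  intro curr
  induction curr with
  | nil => intro f lv nxt _; simp [pvRoundB]
  | cons c rest ih =>
      intro f lv nxt hf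
      cases f with
      | zero => simp at hf
      | succ g =>
          have hstep : pvRoundB concepts lvl (c :: rest) (g + 1, lv, nxt)
              = pvRoundB concepts lvl rest
                  (g, ((pvChildren concepts c).foldl (pvBodyB lvl) (lv, nxt)).1,
                      ((pvChildren concepts c).foldl (pvBodyB lvl) (lv, nxt)).2) := rfl
          rw [hstep]
          have hg : rest.length ≤ g := by simpa using hf
          rw [ih g _ _ hg]
          have hlen : g - rest.length = g + 1 - (c :: rest).length := by
            simp only [List.length_cons]; omega
          rw [← hlen]
          have hflat : (c :: rest).flatMap (pvChildren concepts)
              = pvChildren concepts c ++ rest.flatMap (pvChildren concepts) := by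
            simp
          rw [hflat, List.foldl_append]

theorem pvNewGo_skip (seen : String → Bool) :
    ∀ (xs ys : List String), (∀ c ∈ xs, seen c = true) →
    pvNewGo seen (xs ++ ys) = pvNewGo seen ys := by
  intro xs
  induction xs with
  | nil => intro ys _; simp
  | cons c xs ih =>
      intro ys h
      rw [List.cons_append, pvNewGo, if_pos (h c (List.mem_cons_self ..))]
      exact ih ys (fun x hx => h x (List.mem_cons_of_mem _ hx))

theorem pvNewGo_complete (cs : List String) :
    ∀ (seen : String → Bool) (c : String), c ∈ cs →
    seen c = true ∨ c ∈ pvNewGo seen cs := by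
  induction cs with
  | nil => intro seen c h; simp at h
  | cons d cs ih =>
      intro seen c h
      rcases List.mem_cons.mp h with rfl | hmem
      · by_cases hs : seen c = true
        · exact Or.inl hs
        · rw [pvNewGo, if_neg hs]
          simp
      · by_cases hs : seen d = true
        · rw [pvNewGo, if_pos hs]
          exact ih seen c hmem
        · rw [pvNewGo, if_neg hs]
          rcases ih (fun x => seen x || x == d) c hmem with hsc | hin
          · rcases Bool.or_eq_true_iff.mp hsc with h1 | h1
            · exact Or.inl h1
            · have : c = d := by simpa using h1
              subst this
              exact Or.inr (List.mem_cons_self ..)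
          · exact Or.inr (List.mem_cons_of_mem _ hin)

theorem pvLevelsOf_append (ls : List (List String)) (l : List String) :
    pvLevelsOf (ls ++ [l])
      = l.foldl (fun d n => d.insert n ((ls.length : Nat) : Int)) (pvLevelsOf ls) := by
  unfold pvLevelsOf
  rw [List.zipIdx_append, List.foldl_append]
  simp [List.zipIdx_cons]

theorem pvFlatMap_zipIdx (ls : List (List String)) :
    ∀ (k : Nat), ((ls.zipIdx k).flatMap (fun p => p.1)) = ls.flatten := by
  induction ls with
  | nil => intro k; simp
  | cons l ls ih => intro k; simp [List.zipIdx_cons, ih]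

theorem pvMapFst (xs : List String) (c : Int) :
    List.map (fun x : String × Int => x.1) (List.map (fun n => (n, c)) xs) = xs := by
  induction xs with
  | nil => rfl
  | cons y ys ih => simpa using ih

theorem pvLevelsOf_items (ls : List (List String)) (h : ls.flatten.Nodup) :
    (pvLevelsOf ls).items
      = (ls.zipIdx).flatMap (fun p => p.1.map (fun n => (n, ((p.2 : Nat) : Int)))) := by
  induction ls using List.reverseRecOn with
  | nil => rfl
  | append_singleton ls l ih =>
      rw [List.flatten_append] at h
      rcases List.nodup_append.mp h with ⟨h1, h2, hdisj⟩
      have h2' : l.Nodup := by simpa using h2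
      have hkeys : (pvLevelsOf ls).keys = ls.flatten := by
        simp only [PySem.Dict.keys, ih h1, List.map_flatMap]
        rw [List.flatMap_congr (fun a _ => pvMapFst a.1 _ : ∀ a ∈ ls.zipIdx,
          List.map (fun x : String × Int => x.1)
            (List.map (fun n => (n, ((a.2 : Nat) : Int))) a.1) = a.1)]
        exact pvFlatMap_zipIdx ls 0
      rw [pvLevelsOf_append,
        PySem.Dict.items_foldl_insert_fresh l (fun n => n)
          (fun _ => ((ls.length : Nat) : Int)) (pvLevelsOf ls)
          (by
            intro a ha
            rw [PySem.Dict.contains_eq_decide_mem_keys, hkeys]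
            simpa using fun hmem => (hdisj a hmem a (by simpa using ha)) rfl)
          (by simpa using h2'),
        ih h1, List.zipIdx_append]
      simp [List.zipIdx_cons]

theorem pvLevelsOf_keys (ls : List (List String)) (h : ls.flatten.Nodup) :
    (pvLevelsOf ls).keys = ls.flatten := by
  simp only [PySem.Dict.keys, pvLevelsOf_items ls h, List.map_flatMap]
  rw [List.flatMap_congr (fun a _ => pvMapFst a.1 _ : ∀ a ∈ ls.zipIdx,
    List.map (fun x : String × Int => x.1)
      (List.map (fun n => (n, ((a.2 : Nat) : Int))) a.1) = a.1)]
  exact pvFlatMap_zipIdx ls 0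

theorem pvLevelsOf_contains (ls : List (List String)) (h : ls.flatten.Nodup) (x : String) :
    (pvLevelsOf ls).contains x = ls.flatten.contains x := by
  rw [PySem.Dict.contains_eq_decide_mem_keys, pvLevelsOf_keys ls h]
  simp

-- fallback: max of the assigned levels is (number of layers) - 1
theorem pv_fallback (ls : List (List String)) (hne : ls ≠ []) (hlay : ∀ l ∈ ls, l ≠ [])
    (hnd : ls.flatten.Nodup) :
    PySem.List.maxD (pvLevelsOf ls).values (fun v => v) 0 + 1 = (ls.length : Int) := by
  have hvals : (pvLevelsOf ls).values
      = (ls.zipIdx).flatMap (fun p => p.1.map (fun _ => ((p.2 : Nat) : Int))) := by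
    simp only [PySem.Dict.values, pvLevelsOf_items ls hnd, List.map_flatMap, List.map_map]
    rfl
  have hmem1 : ∀ v ∈ (pvLevelsOf ls).values, ∃ k : Nat, k < ls.length ∧ v = (k : Int) := by
    rw [hvals]
    intro v hv
    rcases List.mem_flatMap.mp hv with ⟨p, hp, hv2⟩
    rcases List.mem_map.mp hv2 with ⟨c, _, rfl⟩
    obtain ⟨a, i⟩ := p
    rcases List.mem_zipIdx hp with ⟨_, hlt, _⟩
    exact ⟨i, by simpa using hlt, rfl⟩
  have hmem2 : ((ls.length : Int) - 1) ∈ (pvLevelsOf ls).values := by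
    rcases List.eq_nil_or_concat ls with rfl | ⟨ls', l, rfl⟩
    · exact absurd rfl hne
    · rw [List.concat_eq_append] at *
      have hl : l ≠ [] := hlay l (by simp)
      obtain ⟨c, hc⟩ := List.exists_mem_of_ne_nil l hl
      rw [hvals, List.zipIdx_append]
      apply List.mem_flatMap.mpr
      refine ⟨(l, 0 + ls'.length), by simp [List.zipIdx_cons], ?_⟩
      apply List.mem_map.mpr
      refine ⟨c, hc, ?_⟩
      push_cast [List.length_append, List.length_singleton]
      ring
  have hVne : (pvLevelsOf ls).values ≠ [] := List.ne_nil_of_mem hmem2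
  obtain ⟨v, t, hVt⟩ := List.exists_cons_of_ne_nil hVne
  have hmaxD : PySem.List.maxD (pvLevelsOf ls).values (fun y => y) 0 = t.foldl max v := by
    rw [hVt]
    simp [PySem.List.maxD, PySem.List.max?_id_cons]
  have hle : t.foldl max v ≤ (ls.length : Int) - 1 := by
    have hballs : ∀ w ∈ (pvLevelsOf ls).values, w ≤ (ls.length : Int) - 1 := by
      intro w hw
      rcases hmem1 w hw with ⟨k, hk, rfl⟩
      have : (k : Int) < (ls.length : Int) := by exact_mod_cast hk
      omega
    rcases PySem.List.foldl_max_mem t v with he | he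
    · rw [he]; exact hballs v (by rw [hVt]; exact List.mem_cons_self ..)
    · exact hballs _ (by rw [hVt]; exact List.mem_cons_of_mem _ he)
  have hge : (ls.length : Int) - 1 ≤ t.foldl max v := by
    rw [hVt] at hmem2
    rcases List.mem_cons.mp hmem2 with he | he
    · rw [he]; exact (PySem.List.le_foldl_max t v).1
    · exact (PySem.List.le_foldl_max t v).2 _ he
  rw [hmaxD]
  omega

-- closure iteration preserves the structural invariants
theorem pvClosure_inv (concepts : List (String × List String)) :
    ∀ (fB : Nat) (layers : List (List String)),
    layers ≠ [] → (∀ l ∈ layers, l ≠ []) → layers.flatten.Nodup →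
    pvClosure concepts fB layers ≠ []
      ∧ (∀ l ∈ pvClosure concepts fB layers, l ≠ [])
      ∧ (pvClosure concepts fB layers).flatten.Nodup := by
  intro fB
  induction fB with
  | zero =>
      intro layers h1 h2 h3
      exact ⟨h1, h2, h3⟩
  | succ f ih =>
      intro layers h1 h2 h3
      rw [pvClosure]
      by_cases hne : ((PySem.List.dedup (layers.flatten.flatMap (pvChildren concepts))).filter
          (fun c => !(PySem.Set.contains (PySem.Set.ofList layers.flatten) c))).isEmpty = true
      · rw [if_pos hne]
        exact ⟨h1, h2, h3⟩
      · rw [if_neg hne]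
        have hnn : (PySem.List.dedup (layers.flatten.flatMap (pvChildren concepts))).filter
            (fun c => !(PySem.Set.contains (PySem.Set.ofList layers.flatten) c)) ≠ [] := by
          simpa using hne
        apply ih
        · simp
        · intro l hl
          rcases List.mem_append.mp hl with hl | hl
          · exact h2 l hl
          · simpa using (List.mem_singleton.mp hl) ▸ hnn
        · rw [List.flatten_append]
          refine List.nodup_append.mpr ⟨h3, ?_, ?_⟩
          · simpa using List.Nodup.filter _ (PySem.List.nodup_dedup _)
          · intro a ha b hb
            have hb' : b ∈ (PySem.List.dedup (layers.flatten.flatMap (pvChildren concepts))).filter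
                (fun c => !(PySem.Set.contains (PySem.Set.ofList layers.flatten) c)) := by
              simpa using hb
            have := (List.mem_filter.mp hb').2
            rw [pvSetContains_ofList] at this
            intro hab
            subst hab
            simp [ha] at this

-- the central simulation: frontier recursion = closure iteration
theorem pv_stage2 (concepts : List (String × List String)) (u : List String)
    (hu : ∀ n c, c ∈ pvChildren concepts n → c ∈ u) :
    ∀ (fB : Nat) (pre : List (List String)) (last : List String) (fA : Nat),
    ((pre ++ [last]).flatten).Nodup →
    (∀ x ∈ (pre ++ [last]).flatten, x ∈ u) →
    (∀ n ∈ pre.flatten, ∀ c ∈ pvChildren concepts n, c ∈ (pre ++ [last]).flatten) →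
    last.length + (u.length - (pre ++ [last]).flatten.length) ≤ fA →
    (u.length - (pre ++ [last]).flatten.length) + 1 ≤ fB →
    pvBfsB concepts fA (pvLevelsOf (pre ++ [last])) last (((pre ++ [last]).length : Int) - 1)
      = pvLevelsOf (pvClosure concepts fB (pre ++ [last])) := by
  intro fB
  induction fB with
  | zero =>
      intro pre last fA hnd hsub hcl hfA hfB
      exact absurd hfB (by omega)
  | succ g ih =>
      intro pre last fA hnd hsub hcl hfA hfB
      have hcont : ∀ x, (pvLevelsOf (pre ++ [last])).contains x
          = ((pre ++ [last]).flatten).contains x :=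
        fun x => pvLevelsOf_contains _ hnd x
      have hskip : ∀ c ∈ (pre.flatten).flatMap (pvChildren concepts),
          (fun x => ((pre ++ [last]).flatten).contains x) c = true := by
        intro c hc
        rcases List.mem_flatMap.mp hc with ⟨n, hn, hcn⟩
        simpa using hcl n hn c hcn
      have hCS : ((pre ++ [last]).flatten).flatMap (pvChildren concepts)
          = (pre.flatten).flatMap (pvChildren concepts)
            ++ last.flatMap (pvChildren concepts) := by
        rw [List.flatten_append]
        simp
      have hNP : (PySem.List.dedup (((pre ++ [last]).flatten).flatMap (pvChildren concepts))).filter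
            (fun c => !(PySem.Set.contains (PySem.Set.ofList ((pre ++ [last]).flatten)) c))
          = pvNewGo (fun x => ((pre ++ [last]).flatten).contains x)
              (last.flatMap (pvChildren concepts)) := by
        rw [pv_new_eq, hCS,
          pvNewGo_skip (fun x => ((pre ++ [last]).flatten).contains x) _ _ hskip]
      rw [pvClosure]
      rw [hNP]
      by_cases hN : pvNewGo (fun x => ((pre ++ [last]).flatten).contains x)
          (last.flatMap (pvChildren concepts)) = []
      · rw [hN]
        simp only [List.isEmpty_nil, if_true]
        cases last with
        | nil => cases fA <;> rw [pvBfsB]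
        | cons node rest =>
            have hlenA : (node :: rest).length ≤ fA := by omega
            cases fA with
            | zero => simp at hlenA
            | succ f =>
                rw [pvBfsB]
                have hr := pvRoundB_flat concepts
                  (((pre ++ [node :: rest]).length : Int) - 1) (node :: rest) (f + 1)
                  (pvLevelsOf (pre ++ [node :: rest])) [] hlenA
                rw [hr]
                dsimp only
                have hb := pv_bodyfold_newGo (((pre ++ [node :: rest]).length : Int) - 1)
                  ((node :: rest).flatMap (pvChildren concepts))
                  (pvLevelsOf (pre ++ [node :: rest])) []
                  (fun x => ((pre ++ [node :: rest]).flatten).contains x) hcont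
                rw [hb, hN]
                simp only [List.foldl_nil, List.nil_append]
                exact pvBfsB_nil concepts _ _ _
      · have hisE : (pvNewGo (fun x => ((pre ++ [last]).flatten).contains x)
            (last.flatMap (pvChildren concepts))).isEmpty = false := by
          rcases hq : pvNewGo (fun x => ((pre ++ [last]).flatten).contains x)
              (last.flatMap (pvChildren concepts)) with _ | ⟨a, t⟩
          · exact absurd hq hN
          · simp
        rw [hisE]
        simp only [Bool.false_eq_true, if_false]
        have hNnodup : (pvNewGo (fun x => ((pre ++ [last]).flatten).contains x)
            (last.flatMap (pvChildren concepts))).Nodup := by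
          rw [← hNP]
          exact List.Nodup.filter _ (PySem.List.nodup_dedup _)
        have hNfresh : ∀ x ∈ pvNewGo (fun x => ((pre ++ [last]).flatten).contains x)
            (last.flatMap (pvChildren concepts)), x ∉ (pre ++ [last]).flatten := by
          intro x hx
          rw [← hNP] at hx
          have h2 := (List.mem_filter.mp hx).2
          rw [pvSetContains_ofList] at h2
          simpa using h2
        have hNsub : ∀ x ∈ pvNewGo (fun x => ((pre ++ [last]).flatten).contains x)
            (last.flatMap (pvChildren concepts)), x ∈ u := by
          intro x hx
          rw [← hNP] at hx
          have h1 := (List.mem_filter.mp hx).1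
          rcases List.mem_flatMap.mp ((PySem.List.mem_dedup _ _).mp h1) with ⟨n, _, hcx⟩
          exact hu n x hcx
        have hN1 : 1 ≤ (pvNewGo (fun x => ((pre ++ [last]).flatten).contains x)
            (last.flatMap (pvChildren concepts))).length := by
          rcases hq : pvNewGo (fun x => ((pre ++ [last]).flatten).contains x)
              (last.flatMap (pvChildren concepts)) with _ | ⟨a, t⟩
          · exact absurd hq hN
          · simp
        have hndRN : ((pre ++ [last]).flatten
            ++ pvNewGo (fun x => ((pre ++ [last]).flatten).contains x)
                (last.flatMap (pvChildren concepts))).Nodup :=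
          List.nodup_append.mpr ⟨hnd, hNnodup, fun a ha b hb hab => hNfresh b hb (hab ▸ ha)⟩
        have heq : (pre ++ [last]
              ++ [pvNewGo (fun x => ((pre ++ [last]).flatten).contains x)
                   (last.flatMap (pvChildren concepts))]).flatten
            = (pre ++ [last]).flatten
              ++ pvNewGo (fun x => ((pre ++ [last]).flatten).contains x)
                  (last.flatMap (pvChildren concepts)) := by
          simp
        have hnd' : ((pre ++ [last]
            ++ [pvNewGo (fun x => ((pre ++ [last]).flatten).contains x)
                 (last.flatMap (pvChildren concepts))]).flatten).Nodup := by
          rw [heq]; exact hndRN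
        have hsub' : ∀ x ∈ (pre ++ [last]
            ++ [pvNewGo (fun x => ((pre ++ [last]).flatten).contains x)
                 (last.flatMap (pvChildren concepts))]).flatten, x ∈ u := by
          intro x hx
          rw [heq] at hx
          rcases List.mem_append.mp hx with h | h
          exacts [hsub x h, hNsub x h]
        have hcl' : ∀ n ∈ (pre ++ [last]).flatten, ∀ c ∈ pvChildren concepts n,
            c ∈ (pre ++ [last]
              ++ [pvNewGo (fun x => ((pre ++ [last]).flatten).contains x)
                   (last.flatMap (pvChildren concepts))]).flatten := by
          intro n hn c hc
          rw [heq]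
          have hn' : n ∈ pre.flatten ++ last := by simpa using hn
          rcases List.mem_append.mp hn' with hp | hl
          · exact List.mem_append.mpr (Or.inl (hcl n (by simpa using hp) c hc))
          · rcases pvNewGo_complete (last.flatMap (pvChildren concepts))
                (fun x => ((pre ++ [last]).flatten).contains x) c
                (List.mem_flatMap.mpr ⟨n, hl, hc⟩) with hseen | hin
            · exact List.mem_append.mpr (Or.inl (by simpa using hseen))
            · exact List.mem_append.mpr (Or.inr hin)
        have hRN : ((pre ++ [last]).flatten
            ++ pvNewGo (fun x => ((pre ++ [last]).flatten).contains x)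
                (last.flatMap (pvChildren concepts))).length ≤ u.length := by
          refine List.Subperm.length_le (List.Nodup.subperm hndRN ?_)
          intro x hx
          rcases List.mem_append.mp hx with h | h
          exacts [hsub x h, hNsub x h]
        rw [List.length_append] at hRN
        cases last with
        | nil => simp [pvNewGo] at hN
        | cons node rest =>
            have hlenA : (node :: rest).length ≤ fA := by omega
            cases fA with
            | zero => simp at hlenA
            | succ f =>
                rw [pvBfsB]
                have hr := pvRoundB_flat concepts
                  (((pre ++ [node :: rest]).length : Int) - 1) (node :: rest) (f + 1)
                  (pvLevelsOf (pre ++ [node :: rest])) [] hlenA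
                rw [hr]
                dsimp only
                have hb := pv_bodyfold_newGo (((pre ++ [node :: rest]).length : Int) - 1)
                  ((node :: rest).flatMap (pvChildren concepts))
                  (pvLevelsOf (pre ++ [node :: rest])) []
                  (fun x => ((pre ++ [node :: rest]).flatten).contains x) hcont
                rw [hb]
                dsimp only
                rw [List.nil_append]
                have hv : (((pre ++ [node :: rest]).length : Int) - 1) + 1
                    = (((pre ++ [node :: rest]).length : Nat) : Int) := by ring
                have hIns : (pvNewGo (fun x => ((pre ++ [node :: rest]).flatten).contains x)
                      ((node :: rest).flatMap (pvChildren concepts))).foldl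
                      (fun d c => d.insert c ((((pre ++ [node :: rest]).length : Int) - 1) + 1))
                      (pvLevelsOf (pre ++ [node :: rest]))
                    = pvLevelsOf ((pre ++ [node :: rest])
                        ++ [pvNewGo (fun x => ((pre ++ [node :: rest]).flatten).contains x)
                             ((node :: rest).flatMap (pvChildren concepts))]) := by
                  rw [pvLevelsOf_append (pre ++ [node :: rest]), hv]
                rw [hIns]
                have hlvl2 : (((pre ++ [node :: rest]).length : Int) - 1) + 1
                    = (((pre ++ [node :: rest]
                        ++ [pvNewGo (fun x => ((pre ++ [node :: rest]).flatten).contains x)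
                             ((node :: rest).flatMap (pvChildren concepts))]).length : Int) - 1) := by
                  simp only [List.length_append, List.length_singleton]
                  push_cast
                  ring
                rw [hlvl2]
                refine ih (pre ++ [node :: rest]) _ (f + 1 - (node :: rest).length)
                  hnd' hsub' hcl' ?_ ?_
                · have hle : ((pre ++ [node :: rest]
                      ++ [pvNewGo (fun x => ((pre ++ [node :: rest]).flatten).contains x)
                           ((node :: rest).flatMap (pvChildren concepts))]).flatten).length
                      = ((pre ++ [node :: rest]).flatten).length
                        + (pvNewGo (fun x => ((pre ++ [node :: rest]).flatten).contains x)
                            ((node :: rest).flatMap (pvChildren concepts))).length := by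
                    rw [heq, List.length_append]
                  rw [hle]
                  omega
                · have hle : ((pre ++ [node :: rest]
                      ++ [pvNewGo (fun x => ((pre ++ [node :: rest]).flatten).contains x)
                           ((node :: rest).flatMap (pvChildren concepts))]).flatten).length
                      = ((pre ++ [node :: rest]).flatten).length
                        + (pvNewGo (fun x => ((pre ++ [node :: rest]).flatten).contains x)
                            ((node :: rest).flatMap (pvChildren concepts))).length := by
                    rw [heq, List.length_append]
                  rw [hle]
                  omega

-- ===== VERDICT (by name: the statement is the Claim_ definition above) =====
theorem compute_levels_spec : Claim_equal_compute_levels := by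
  intro root concepts nodes _
  unfold Spec_compute_levels compute_levels compute_levels_alt
  dsimp only
  have hulen : (root :: concepts.flatMap (fun p => p.2)).length
      = 1 + (concepts.map (fun p => p.2.length)).sum := by
    simp [List.length_flatMap]
    omega
  have hu : ∀ n c, c ∈ pvChildren concepts n → c ∈ root :: concepts.flatMap (fun p => p.2) := by
    intro n c hc
    unfold pvChildren at hc
    cases hf : concepts.find? (fun p => p.1 == n) with
    | none => rw [hf] at hc; simp at hc
    | some p =>
        rw [hf] at hc
        simp at hc
        exact List.mem_cons_of_mem _ (List.mem_flatMap.mpr ⟨p, List.mem_of_find?_eq_some hf, hc⟩)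
  have h1 := pv_main concepts (1 + (concepts.map (fun p => p.2.length)).sum)
      ((PySem.Dict.empty).insert root 0) [root] 0
      (by intro n hn; simp at hn; subst hn; exact PySem.Dict.get?_insert_self _ _ _)
  have h0 : pvLevelsOf [[root]] = (PySem.Dict.empty).insert root 0 := rfl
  have h2 := pv_stage2 concepts (root :: concepts.flatMap (fun p => p.2)) hu
      (1 + (concepts.map (fun p => p.2.length)).sum) [] [root]
      (1 + (concepts.map (fun p => p.2.length)).sum)
      (by simp) (by simp) (by simp)
      (by simp [hulen]) (by simp [hulen])
  simp only [List.nil_append] at h2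
  rw [h0] at h2
  have hlvl0 : ((([[root]] : List (List String)).length : Int) - 1) = 0 := by norm_num
  rw [hlvl0] at h2
  have hAB := h1.trans h2
  obtain ⟨hne, hlay, hndF⟩ := pvClosure_inv concepts
    (1 + (concepts.map (fun p => p.2.length)).sum) [[root]]
    (by simp) (by simp) (by simp)
  have hfb := pv_fallback (pvClosure concepts
    (1 + (concepts.map (fun p => p.2.length)).sum) [[root]]) hne hlay hndF
  rw [hAB, hfb]
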